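-- pv_equiv track=rewrite | github.com/Fal318/Robocon-2020 | master/library/midi_to_csv.py | fix_arrays
-- ===== SOURCE A (Python) =====
-- def fix_arrays(arrs: list, time_length: int) -> list:
--     """配列を使いやすい形に変換"""
--     fixed_arrays = ["" for _ in range(time_length)]
--     arrs.sort(key=lambda x: x[0][0])
--     while len(arrs) > 0:
--         arr = arrs.pop(0)
--         start, stop = int(arr[0][0]), int(arr[0][1])
--         for index in range(start, stop):
--             fixed_arrays[index] = arr[1]
--     return fixed_arrays
-- ===== SOURCE B (Python) =====
-- def fix_arrays(arrs: list, time_length: int) -> list: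
--     """配列を使いやすい形に変換 (per-cell: value of the highest-precedence interval covering the cell)"""
--     order = sorted(arrs, key=lambda a: a[0][0])
--     rev = order[::-1]
--
--     def cell(i):
--         for interval, value in rev:
--             if interval[0] <= i < interval[1]:
--                 return value
--         return ""
--
--     return [cell(i) for i in range(time_length)]
-- ===== Notes on version B (the rewrite author's own statement) =====
-- stated objective: alternative
-- what changed: B replaces A's destructive paint-by-mutation loop (sort in place, pop(0) each interval, overwrite array cells) with a non-mutating per-cell computation: each output cell takes the value of the first interval covering it in reverse sorted order; B does not mutate arrs, while A sorts and empties it (the equivalence is about the return value).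
-- outside the precondition, e.g. on fix_arrays([([-1, 1], 'x')], 3): A returns ['x', '', 'x'], B returns ['x', '', '']; on fix_arrays([([0, 1], 'y')], 0): A raises IndexError, B returns []
import Mathlib
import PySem

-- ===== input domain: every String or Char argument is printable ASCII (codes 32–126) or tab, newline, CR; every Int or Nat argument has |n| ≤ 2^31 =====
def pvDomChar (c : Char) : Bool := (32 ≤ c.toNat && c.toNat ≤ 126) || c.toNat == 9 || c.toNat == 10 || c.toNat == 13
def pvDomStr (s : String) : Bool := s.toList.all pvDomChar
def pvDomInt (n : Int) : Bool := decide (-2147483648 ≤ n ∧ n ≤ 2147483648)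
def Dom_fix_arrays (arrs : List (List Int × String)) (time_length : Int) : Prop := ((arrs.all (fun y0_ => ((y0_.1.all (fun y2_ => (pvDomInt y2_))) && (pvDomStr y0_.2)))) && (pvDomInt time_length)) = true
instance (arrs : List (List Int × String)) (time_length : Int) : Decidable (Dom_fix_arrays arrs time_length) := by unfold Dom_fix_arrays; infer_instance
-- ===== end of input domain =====

-- B paints each cell by scanning the sorted intervals in reverse; A mutates (sorts and empties arrs,
-- overwrites an array cell by cell) — the equivalence proved here is about the RETURN value only.

-- ===== PORT A =====
-- fixed_arrays[index] = v : Python assignment with possibly negative (wrapping) index;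
-- identity on an out-of-range index, which Python only reaches outside Pre_ (IndexError).
def pySetIdx (xs : List String) (i : Int) (v : String) : List String :=
  let j : Int := if i < 0 then i + xs.length else i
  if 0 ≤ j ∧ j < xs.length then xs.set j.toNat v else xs

-- the body of 'for index in range(start, stop): fixed_arrays[index] = arr[1]'
def paintA (v : String) (fixed : List String) (start stop : Int) : List String :=
  (PySem.List.pyRange start stop 1).foldl (fun acc idx => pySetIdx acc idx v) fixed

-- arr[0][0] / arr[0][1] are ported as List.getD _ _ 0, exact on Pre_ (lists of length ≥ 2;
-- a shorter list raises IndexError in Python and is outside Pre_).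
def fix_arrays (arrs : List (List Int × String)) (time_length : Int) : List String :=
  let fixed := List.replicate time_length.toNat ""
  let s := PySem.List.sorted arrs (fun x => x.1.getD 0 0) false
  s.foldl (fun fx arr => paintA arr.2 fx (arr.1.getD 0 0) (arr.1.getD 1 0)) fixed

-- ===== PORT B =====
-- cell(i): first interval of rev covering i, else ""
def cellB (rev : List (List Int × String)) (i : Int) : String :=
  match rev with
  | [] => ""
  | (l, v) :: rest => if l.getD 0 0 ≤ i ∧ i < l.getD 1 0 then v else cellB rest i

def fix_arrays_alt (arrs : List (List Int × String)) (time_length : Int) : List String :=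
  let rev := (PySem.List.sorted arrs (fun a => a.1.getD 0 0) false).reverse
  (PySem.List.pyRange 0 time_length 1).map (fun i => cellB rev i)

-- ===== PRECONDITION & SPEC =====
-- Pre_ excludes exactly: (a) the inputs on which A raises — an interval list of length < 2
-- (IndexError reading arr[0][0]/arr[0][1]) or a non-degenerate interval painting an index outside
-- Python's valid range [-time_length, time_length) (IndexError) — and (b) non-degenerate intervals
-- with a NEGATIVE start, on which A returns a value that is an artefact of Python's negative-index
-- wraparound (it paints cells at the END of the array), which B, clamping the interval to the
-- array, does not reproduce.
def Pre_fix_arrays (arrs : List (List Int × String)) (time_length : Int) : Prop :=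
  ∀ p ∈ arrs, 2 ≤ p.1.length ∧
    (p.1.getD 0 0 < p.1.getD 1 0 →
      0 ≤ p.1.getD 0 0 ∧ p.1.getD 1 0 ≤ time_length)
instance (arrs : List (List Int × String)) (time_length : Int) : Decidable (Pre_fix_arrays arrs time_length) := by unfold Pre_fix_arrays; infer_instance
def pvWitness_fix_arrays : (List (List Int × String)) × Int := ([([0, 2], "a"), ([1, 3], "b")], 3)

def Spec_fix_arrays (arrs : List (List Int × String)) (time_length : Int) (out : List String) : Prop := out = fix_arrays_alt arrs time_length
instance (arrs : List (List Int × String)) (time_length : Int) (out : List String) : Decidable (Spec_fix_arrays arrs time_length out) := by unfold Spec_fix_arrays; infer_instance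

-- ===== CLAIM (what is proved, stated in full; the proofs are below) =====
def Claim_equal_fix_arrays : Prop := ∀ (arrs : List (List Int × String)) (time_length : Int), Dom_fix_arrays arrs time_length → Pre_fix_arrays arrs time_length → Spec_fix_arrays arrs time_length (fix_arrays arrs time_length)

-- ===== LEMMAS AND PROOFS =====

theorem length_pySetIdx (xs : List String) (i : Int) (v : String) :
    (pySetIdx xs i v).length = xs.length := by
  simp only [pySetIdx]
  split <;> split <;> simp

theorem getElem?_pySetIdx (xs : List String) (i : Int) (v : String) (k : Nat)
    (h0 : 0 ≤ i) (h1 : i < xs.length) :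
    (pySetIdx xs i v)[k]? = if (k : Int) = i then some v else xs[k]? := by
  unfold pySetIdx
  have hnot : ¬ i < 0 := by omega
  simp only [hnot, if_false, h0, h1, and_self, if_true, List.getElem?_set]
  by_cases hk : (k : Int) = i
  · have : i.toNat = k := by omega
    simp [this, hk]
    omega
  · have : i.toNat ≠ k := by omega
    simp [this, hk]

theorem length_paint_fold (l : List Int) (xs : List String) (v : String) :
    (l.foldl (fun acc idx => pySetIdx acc idx v) xs).length = xs.length := by
  induction l generalizing xs with
  | nil => rfl
  | cons a t ih => simp [List.foldl, ih, length_pySetIdx]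

theorem length_paintA (v : String) (xs : List String) (start stop : Int) :
    (paintA v xs start stop).length = xs.length :=
  length_paint_fold _ _ _

theorem getElem?_paintA (v : String) (xs : List String) (start stop : Int) (k : Nat)
    (h0 : 0 ≤ start) (h1 : stop ≤ (xs.length : Int)) :
    (paintA v xs start stop)[k]? =
      if start ≤ (k : Int) ∧ (k : Int) < stop then some v else xs[k]? := by
  by_cases hlt : start < stop
  · have hmeas : (stop - (start + 1)).toNat < (stop - start).toNat := by omega
    rw [paintA, PySem.List.pyRange_one_cons hlt, List.foldl_cons]
    have hrec := getElem?_paintA v (pySetIdx xs start v) (start + 1) stop k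
      (by omega) (by rw [length_pySetIdx]; exact h1)
    rw [paintA] at hrec
    rw [hrec, getElem?_pySetIdx xs start v k h0 (by omega)]
    split_ifs <;> first | rfl | (exfalso; omega)
  · rw [paintA, PySem.List.pyRange_one_eq_nil (by omega)]
    simp; omega
termination_by (stop - start).toNat

-- proof-only helper: cellB with an explicit default for the uncovered case
def cellAux (rev : List (List Int × String)) (i : Int) (d : String) : String :=
  match rev with
  | [] => d
  | (l, v) :: rest => if l.getD 0 0 ≤ i ∧ i < l.getD 1 0 then v else cellAux rest i d

theorem cellAux_eq_cellB (rev : List (List Int × String)) (i : Int) :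
    cellAux rev i "" = cellB rev i := by
  induction rev with
  | nil => rfl
  | cons a t ih => cases a; simp [cellAux, cellB, ih]

theorem length_foldA (s : List (List Int × String)) (xs : List String) :
    (s.foldl (fun fx arr => paintA arr.2 fx (arr.1.getD 0 0) (arr.1.getD 1 0)) xs).length
      = xs.length := by
  induction s generalizing xs with
  | nil => rfl
  | cons a t ih => simp only [List.foldl_cons]; rw [ih, length_paintA]

-- the value A's while-loop leaves in cell k: the LAST interval of s covering k, i.e. the
-- FIRST interval of s.reverse covering k (over the cell's previous content)
theorem fold_getElem? (s : List (List Int × String)) (xs : List String) (k : Nat)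
    (hk : k < xs.length)
    (hs : ∀ p ∈ s, p.1.getD 0 0 < p.1.getD 1 0 →
      0 ≤ p.1.getD 0 0 ∧ p.1.getD 1 0 ≤ (xs.length : Int)) :
    (s.foldl (fun fx arr => paintA arr.2 fx (arr.1.getD 0 0) (arr.1.getD 1 0)) xs)[k]? =
      some (cellAux s.reverse (k : Int) (xs.getD k "")) := by
  induction s using List.reverseRecOn with
  | nil =>
    simp [cellAux, List.getD_eq_getElem?_getD, List.getElem?_eq_getElem hk]
  | append_singleton s a ih =>
    have hss : ∀ p ∈ s, p.1.getD 0 0 < p.1.getD 1 0 →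
        0 ≤ p.1.getD 0 0 ∧ p.1.getD 1 0 ≤ (xs.length : Int) := by
      intro p hp; exact hs p (by simp [hp])
    rw [List.foldl_append, List.foldl_cons, List.foldl_nil, List.reverse_append]
    simp only [List.reverse_cons, List.reverse_nil, List.nil_append, List.singleton_append,
      cellAux]
    by_cases hlt : a.1.getD 0 0 < a.1.getD 1 0
    · obtain ⟨h0, h1⟩ := hs a (by simp) hlt
      rw [getElem?_paintA _ _ _ _ k h0 (by rw [length_foldA]; exact h1), ih hss]
      split_ifs <;> rfl
    · have hid : paintA a.2
          (s.foldl (fun fx arr => paintA arr.2 fx (arr.1.getD 0 0) (arr.1.getD 1 0)) xs)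
          (a.1.getD 0 0) (a.1.getD 1 0)
          = s.foldl (fun fx arr => paintA arr.2 fx (arr.1.getD 0 0) (arr.1.getD 1 0)) xs := by
        rw [paintA, PySem.List.pyRange_one_eq_nil (by omega)]; rfl
      have hnc : ¬ (a.1.getD 0 0 ≤ (k : Int) ∧ (k : Int) < a.1.getD 1 0) := by omega
      rw [hid, ih hss, if_neg hnc]

theorem fix_arrays_spec : Claim_equal_fix_arrays := by
  intro arrs tl _ hpre
  unfold Spec_fix_arrays
  unfold fix_arrays fix_arrays_alt
  simp only []
  apply List.ext_getElem?
  intro k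
  have hlen : (List.replicate tl.toNat ("" : String)).length = tl.toNat := by simp
  have hs : ∀ p ∈ PySem.List.sorted arrs (fun x => x.1.getD 0 0) false,
      p.1.getD 0 0 < p.1.getD 1 0 →
      0 ≤ p.1.getD 0 0 ∧ p.1.getD 1 0 ≤ ((List.replicate tl.toNat ("" : String)).length : Int) := by
    intro p hp hlt
    have hmem : p ∈ arrs := (PySem.List.mem_sorted arrs _ false p).mp hp
    have h2 := (hpre p hmem).2 hlt
    have htn := Int.self_le_toNat tl
    rw [hlen]
    omega
  by_cases hk : k < tl.toNat
  · rw [fold_getElem? _ _ k (by rw [hlen]; exact hk) hs]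
    have hd : (List.replicate tl.toNat ("" : String)).getD k "" = "" := by
      simp [List.getD_eq_getElem?_getD, List.getElem?_replicate]
      split <;> rfl
    rw [hd, cellAux_eq_cellB, List.getElem?_map, PySem.List.getElem?_pyRange_one]
    simp [hk]
  · have h1 : (List.foldl (fun fx arr => paintA arr.2 fx (arr.1.getD 0 0) (arr.1.getD 1 0))
        (List.replicate tl.toNat "")
        (PySem.List.sorted arrs (fun x => x.1.getD 0 0) false)).length ≤ k := by
      rw [length_foldA, hlen]; omega
    rw [List.getElem?_eq_none h1, List.getElem?_eq_none]
    rw [List.length_map, PySem.List.length_pyRange_one]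
    omega
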